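-- pv_equiv track=rewrite | github.com/AmberBianco/Coding-and-Informatics-Projects | Huntingtons_Project_608.py | countCAG
-- ===== SOURCE A (Python) =====
-- def countCAG(dna):
--     """doc string will count the CAG in the DNA sequence provided. Parameter dna: DNA sequence containing CAG repeats that is read in three index frames. Returns count: the number of times CAG appears in DNA.
--     Preconditions: Assumes DNA begins CAG sequence. Assumes DNA base pairs are accurate and stops at first non CAG sequence."""
--     count=0
--     i=0
--     while i< len(dna):
--         if dna [i:i+3]=="CAG":
--             count += 1
--             i += 3
--         else:
--             break
--     return count
-- ===== SOURCE B (Python) =====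
-- import re
--
-- def countCAG(dna):
--     m = re.match(r'(?:CAG)+', dna)
--     return 0 if m is None else m.end() // 3
-- ===== Notes on version B (the rewrite author's own statement) =====
-- stated objective: idiomatic
-- what changed: Replaces the index-stepping while loop with a single anchored regex match of (?:CAG)+, deriving the count from the match end divided by 3.
import Mathlib
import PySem

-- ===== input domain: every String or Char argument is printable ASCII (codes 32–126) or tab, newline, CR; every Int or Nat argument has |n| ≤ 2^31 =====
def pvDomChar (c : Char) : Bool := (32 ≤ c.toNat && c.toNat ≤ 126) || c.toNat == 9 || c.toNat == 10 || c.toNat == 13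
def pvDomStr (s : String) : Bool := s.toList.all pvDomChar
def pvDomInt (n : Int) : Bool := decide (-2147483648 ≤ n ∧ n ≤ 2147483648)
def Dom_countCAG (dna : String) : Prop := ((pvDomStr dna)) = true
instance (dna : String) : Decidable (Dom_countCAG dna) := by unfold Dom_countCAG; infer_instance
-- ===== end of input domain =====

-- B replaces A's index-stepping while loop with an anchored regex match of (?:CAG)+ (idiomatic).

-- ===== PORT A =====
-- A's while loop: i steps by 3 while dna[i:i+3] == "CAG"; count accumulates.
def countCAGLoop (s : List Char) (count : Int) (i : Nat) : Int :=
  if _h : i < s.length then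
    -- dna[i:i+3] with nonnegative in-range i is take 3 of drop i (Python slice, exact here)
    if (s.drop i).take 3 = ['C', 'A', 'G'] then
      countCAGLoop s (count + 1) (i + 3)
    else count
  else count
termination_by s.length - i
decreasing_by omega

def countCAG (dna : String) : Int := countCAGLoop dna.toList 0 0

-- ===== PORT B =====
-- the regex engine's anchored match of (?:CAG)+: returns some (end index) of the maximal
-- leading run of 'CAG' triplets, none if the pattern does not match at position 0
def matchCAGplus : List Char → Option Nat
  | 'C' :: 'A' :: 'G' :: rest =>
      some (3 + ((matchCAGplus rest).getD 0))
  | _ => none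

def countCAG_alt (dna : String) : Int :=
  match matchCAGplus dna.toList with
  | none => 0
  | some e => PySem.Int.floordiv (Int.ofNat e) 3   -- m.end() // 3

-- ===== PRECONDITION & SPEC =====
def Spec_countCAG (dna : String) (out : Int) : Prop := out = countCAG_alt dna
instance (dna : String) (out : Int) : Decidable (Spec_countCAG dna out) := by unfold Spec_countCAG; infer_instance

-- ===== CLAIM (what is proved, stated in full; the proofs are below) =====
def Claim_equal_countCAG : Prop := ∀ (dna : String), Dom_countCAG dna → Spec_countCAG dna (countCAG dna)

-- ===== LEMMAS AND PROOFS =====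

-- common reference count: number of leading 'CAG' triplets
def cagRun : List Char → Int
  | 'C' :: 'A' :: 'G' :: rest => 1 + cagRun rest
  | _ => 0

lemma matchCAGplus_eq : ∀ l,
    (match matchCAGplus l with
     | none => (0 : Int)
     | some e => PySem.Int.floordiv (Int.ofNat e) 3) = cagRun l := by
  intro l
  induction l using matchCAGplus.induct with
  | case1 rest ih =>
    cases hm : matchCAGplus rest with
    | none =>
      simp [matchCAGplus, hm, cagRun]
      have := ih
      simp [hm] at this
      omega
    | some e =>
      simp [matchCAGplus, hm, cagRun]
      have := ih
      simp [hm] at this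
      rw [← this, show (3 : Int) + ↑e = ↑e + 1 * 3 by ring,
          Int.add_mul_ediv_right _ _ (by norm_num)]
      ring
  | case2 l _ =>
    simp [matchCAGplus, cagRun]

lemma cagRun_zero_of_take (l : List Char) (h : l.take 3 ≠ ['C', 'A', 'G']) :
    cagRun l = 0 := by
  induction l using cagRun.induct with
  | case1 rest ih => exact absurd (by simp) h
  | case2 l _ => simp [cagRun]

lemma countCAGLoop_eq : ∀ n (s : List Char) (i : Nat) (c : Int),
    s.length - i ≤ n → countCAGLoop s c i = c + cagRun (s.drop i) := by
  intro n
  induction n with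
  | zero =>
    intro s i c h
    rw [countCAGLoop]
    have hge : ¬ i < s.length := by omega
    simp [hge]
    rw [List.drop_eq_nil_of_le (by omega)]
    simp [cagRun]
  | succ n ih =>
    intro s i c h
    rw [countCAGLoop]
    by_cases hlt : i < s.length
    · simp only [hlt, dif_pos]
      by_cases hcag : (s.drop i).take 3 = ['C', 'A', 'G']
      · simp only [hcag, if_pos]
        rw [ih s (i + 3) (c + 1) (by omega)]
        have hdrop : s.drop (i + 3) = (s.drop i).drop 3 := by
          rw [List.drop_drop]
          try rw [Nat.add_comm]
        rw [hdrop]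
        have : cagRun (s.drop i) = 1 + cagRun ((s.drop i).drop 3) := by
          have := List.take_append_drop 3 (s.drop i)
          rw [hcag] at this
          rw [← this]
          simp [cagRun]
        omega
      · simp only [hcag, if_neg, not_false_iff]
        have := cagRun_zero_of_take (s.drop i) hcag
        omega
    · simp [hlt]
      rw [List.drop_eq_nil_of_le (by omega)]
      simp [cagRun]

-- ===== VERDICT (by name: the statement is the Claim_ definition above) =====
theorem countCAG_spec : Claim_equal_countCAG := by
  intro dna _
  unfold Spec_countCAG countCAG countCAG_alt
  rw [countCAGLoop_eq dna.toList.length dna.toList 0 0 (by omega)]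
  simp only [List.drop_zero, zero_add]
  exact (matchCAGplus_eq dna.toList).symm
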